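-- pv_equiv track=rewrite | github.com/Matt-Holeman/AdventOfCode2023 | Day 14/PartOne.py | tiltBoard
-- ===== SOURCE A (Python) =====
-- def tiltBoard(platformList):
--     outList = []
--     for row in platformList:
--         count = len(row) - len(row.replace('O',''))
--         for _ in range(count):
--             lowestIndex = -1
--             for cIdx in range(len(row)):
--                 c = row[cIdx]
--                 if c == 'O' and lowestIndex != -1:
--                     row = row[:cIdx] + '.' + row[cIdx+1:]
--                     row = row[:lowestIndex] + 'O' + row[lowestIndex+1:]
--                     break
--                 elif c == '.' and lowestIndex == -1:
--                     lowestIndex = cIdx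
--                 elif c == '#':
--                     lowestIndex = -1
--         outList.append(row)
--     return outList
-- ===== SOURCE B (Python) =====
-- def tiltBoard(platformList):
--     # One linear pass per row: split on '#'; in each segment every rollable slot
--     # ('O' or '.') becomes '.', then the first count-of-'O' slots are turned back
--     # into 'O' -- i.e. the rocks are packed at the front of the segment.
--     out = []
--     for row in platformList:
--         pieces = []
--         for seg in row.split('#'):
--             pieces.append(seg.replace('O', '.').replace('.', 'O', seg.count('O')))
--         out.append('#'.join(pieces))
--     return out
-- ===== Notes on version B (the rewrite author's own statement) =====
-- stated objective: simpler
-- what changed: A repeatedly rescans each row, moving one rock per full index scan with string re-slicing; B splits each row on '#' once and packs every segment in one step (all slots to '.', then the first count-of-'O' slots back to 'O'), with no iterated scanning or index arithmetic.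
import Mathlib
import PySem

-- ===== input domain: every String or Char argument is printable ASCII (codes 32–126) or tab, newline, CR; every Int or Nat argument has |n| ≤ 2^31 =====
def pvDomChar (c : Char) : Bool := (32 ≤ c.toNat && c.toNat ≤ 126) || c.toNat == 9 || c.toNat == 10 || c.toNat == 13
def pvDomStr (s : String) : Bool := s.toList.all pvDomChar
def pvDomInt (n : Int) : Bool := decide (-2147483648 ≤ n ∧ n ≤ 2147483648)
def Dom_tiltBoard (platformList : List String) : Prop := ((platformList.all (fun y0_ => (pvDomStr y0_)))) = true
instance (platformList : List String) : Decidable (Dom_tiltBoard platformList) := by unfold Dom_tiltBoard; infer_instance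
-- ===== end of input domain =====

-- B replaces A's move-one-rock-per-rescan loop by a single split-on-'#' pass that packs
-- each segment's 'O' count up front (objective: simpler).


-- ===== PORT A =====
-- inner 'for cIdx in range(len(row))' loop of A, with its break (returns the new row);
-- Python's in-range indexing row[cIdx] is PySem.List.pyGet? (the none branch is unreachable:
-- every cIdx comes from range(len(row))).
def tiltInner : List Char → List Int → Int → List Char
  | row, [], _ => row
  | row, cIdx :: rest, lowestIndex =>
    match PySem.List.pyGet? row cIdx with
    | none => row
    | some c =>
      if c = 'O' ∧ lowestIndex ≠ -1 then
        -- row = row[:cIdx] + '.' + row[cIdx+1:]; row = row[:lowestIndex] + 'O' + row[lowestIndex+1:]; break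
        let row1 := PySem.List.slice row none (some cIdx) ++ ['.'] ++ PySem.List.slice row (some (cIdx + 1)) none
        let row2 := PySem.List.slice row1 none (some lowestIndex) ++ ['O'] ++ PySem.List.slice row1 (some (lowestIndex + 1)) none
        row2
      else if c = '.' ∧ lowestIndex = -1 then tiltInner row rest cIdx
      else if c = '#' then tiltInner row rest (-1)
      else tiltInner row rest lowestIndex

-- one row of A: count = len(row) - len(row.replace('O','')); 'for _ in range(count):' re-runs the scan
def tiltRowA (row : List Char) : List Char :=
  let count : Int := PySem.Chars.len row - PySem.Chars.len (PySem.Chars.replace row ['O'] [])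
  (PySem.List.pyRange 0 count 1).foldl
    (fun r _ => tiltInner r (PySem.List.pyRange 0 (PySem.Chars.len r) 1) (-1)) row

def tiltBoard (platformList : List String) : List String :=
  platformList.foldl (fun outList row => outList ++ [String.ofList (tiltRowA row.toList)]) []

-- ===== PORT B =====
-- hand port of Python str.split('#') for a 1-char separator (exact: keeps empty pieces, '' -> [''])
def splitHash : List Char → List (List Char)
  | [] => [[]]
  | c :: rest =>
    if c = '#' then [] :: splitHash rest
    else
      match splitHash rest with
      | s :: ss => (c :: s) :: ss
      | [] => [[c]]   -- unreachable: splitHash never returns []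

-- hand port of Python '#'.join (exact)
def joinHash : List (List Char) → List Char
  | [] => []
  | [s] => s
  | s :: ss => s ++ '#' :: joinHash ss

-- hand port of seg.replace('O', '.') for the 1-char pattern (exact: no overlap possible)
def replOtoDot : List Char → List Char
  | [] => []
  | c :: rest => (if c = 'O' then '.' else c) :: replOtoDot rest

-- hand port of s.replace('.', 'O', n): replace only the first n occurrences (exact)
def replDotToO : Nat → List Char → List Char
  | _, [] => []
  | n, c :: rest =>
    if c = '.' ∧ 0 < n then 'O' :: replDotToO (n - 1) rest else c :: replDotToO n rest

def tiltRowB (row : List Char) : List Char :=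
  joinHash ((splitHash row).map (fun seg => replDotToO (seg.count 'O') (replOtoDot seg)))

def tiltBoard_alt (platformList : List String) : List String :=
  platformList.map (fun row => String.ofList (tiltRowB row.toList))

-- ===== PRECONDITION & SPEC =====
def Spec_tiltBoard (platformList : List String) (out : List String) : Prop := out = tiltBoard_alt platformList
instance (platformList : List String) (out : List String) : Decidable (Spec_tiltBoard platformList out) := by unfold Spec_tiltBoard; infer_instance

-- ===== CLAIM (what is proved, stated in full; the proofs are below) =====
def Claim_equal_tiltBoard : Prop := ∀ (platformList : List String), Dom_tiltBoard platformList → Spec_tiltBoard platformList (tiltBoard platformList)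

-- ===== LEMMAS AND PROOFS =====

-- structural characterisation of A's inner scan: find the first '.'-then-'O' pair in a segment
def grabO : List Char → Option (List Char)
  | [] => none
  | c :: rest =>
    if c = 'O' then some ('.' :: rest)
    else if c = '#' then none
    else (grabO rest).map (c :: ·)

def findSwap : List Char → Option (List Char)
  | [] => none
  | c :: rest =>
    if c = '.' then
      match grabO rest with
      | some r' => some ('O' :: r')
      | none => (findSwap rest).map (c :: ·)
    else (findSwap rest).map (c :: ·)

def stepT (row : List Char) : List Char := (findSwap row).getD row

-- what B does to one segment, fused into a single pass: the first n slots ('O'/'.')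
-- become 'O', the remaining slots '.', other characters are copied
def fillSeg : Nat → List Char → List Char
  | _, [] => []
  | n, c :: rest =>
    if c = 'O' ∨ c = '.' then
      if 0 < n then 'O' :: fillSeg (n - 1) rest else '.' :: fillSeg n rest
    else c :: fillSeg n rest

-- number of 'O's in the current '#'-segment
def segO : List Char → Nat
  | [] => 0
  | c :: r => if c = '#' then 0 else (if c = 'O' then 1 else 0) + segO r

-- the tilted row, with per-segment counts recomputed at each '#'
def fillGo : Nat → List Char → List Char
  | _, [] => []
  | n, c :: r =>
    if c = '#' then '#' :: fillGo (segO r) r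
    else if c = 'O' ∨ c = '.' then
      if 0 < n then 'O' :: fillGo (n - 1) r else '.' :: fillGo n r
    else c :: fillGo n r

-- dot-seen state after scanning a list (false after '#', true after '.')
def dotSt : Bool → List Char → Bool
  | b, [] => b
  | b, c :: r => dotSt (if c = '#' then false else if c = '.' then true else b) r

-- number of movable 'O's (an 'O' with a '.' before it in its segment)
def unsC : Bool → List Char → Nat
  | _, [] => 0
  | b, c :: r =>
    if c = '#' then unsC false r
    else if c = '.' then unsC true r
    else if c = 'O' then (if b then 1 else 0) + unsC b r
    else unsC b r

-- head-equation lemmas for the scan-state functions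
theorem segO_hash (r : List Char) : segO ('#' :: r) = 0 := by simp [segO]
theorem segO_cons {c : Char} (h : c ≠ '#') (r : List Char) :
    segO (c :: r) = (if c = 'O' then 1 else 0) + segO r := by simp [segO, h]
theorem dotSt_hash (b : Bool) (r : List Char) : dotSt b ('#' :: r) = dotSt false r := by simp [dotSt]
theorem dotSt_dot (b : Bool) (r : List Char) : dotSt b ('.' :: r) = dotSt true r := by simp [dotSt]
theorem dotSt_other {c : Char} (h1 : c ≠ '#') (h2 : c ≠ '.') (b : Bool) (r : List Char) :
    dotSt b (c :: r) = dotSt b r := by simp [dotSt, h1, h2]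
theorem unsC_hash (b : Bool) (r : List Char) : unsC b ('#' :: r) = unsC false r := by simp [unsC]
theorem unsC_dot (b : Bool) (r : List Char) : unsC b ('.' :: r) = unsC true r := by simp [unsC]
theorem unsC_O (b : Bool) (r : List Char) :
    unsC b ('O' :: r) = (if b then 1 else 0) + unsC b r := by simp [unsC]
theorem unsC_other {c : Char} (h1 : c ≠ '#') (h2 : c ≠ '.') (h3 : c ≠ 'O') (b : Bool)
    (r : List Char) : unsC b (c :: r) = unsC b r := by simp [unsC, h1, h2, h3]
theorem fillGo_hash (n : Nat) (r : List Char) :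
    fillGo n ('#' :: r) = '#' :: fillGo (segO r) r := by simp [fillGo]
theorem fillGo_slot {c : Char} (h : c = 'O' ∨ c = '.') (n : Nat) (r : List Char) :
    fillGo n (c :: r) = if 0 < n then 'O' :: fillGo (n - 1) r else '.' :: fillGo n r := by
  rcases h with h | h <;> subst h <;> simp [fillGo]
theorem fillGo_other {c : Char} (h1 : c ≠ '#') (h2 : ¬(c = 'O' ∨ c = '.')) (n : Nat)
    (r : List Char) : fillGo n (c :: r) = c :: fillGo n r := by simp [fillGo, h1, h2]

theorem findSwap_dot_some {rest r0 : List Char} (hg : grabO rest = some r0) :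
    findSwap ('.' :: rest) = some ('O' :: r0) := by simp [findSwap, hg]
theorem findSwap_dot_none {rest : List Char} (hg : grabO rest = none) :
    findSwap ('.' :: rest) = Option.map ('.' :: ·) (findSwap rest) := by simp [findSwap, hg]
theorem findSwap_other {c : Char} (h : c ≠ '.') (rest : List Char) :
    findSwap (c :: rest) = Option.map (c :: ·) (findSwap rest) := by simp [findSwap, h]

-- ---- A-side bridge ----

theorem replace_go_filter (fuel : Nat) : ∀ (l acc : List Char), l.length ≤ fuel →
    PySem.Chars.replace.go ['O'] [] fuel l acc = acc.reverse ++ l.filter (· ≠ 'O') := by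
  induction fuel with
  | zero =>
    intro l acc h
    have : l = [] := List.eq_nil_of_length_eq_zero (Nat.le_zero.mp h)
    subst this; simp [PySem.Chars.replace.go]
  | succ fuel ih =>
    intro l acc h
    cases l with
    | nil => simp [PySem.Chars.replace.go]
    | cons c t =>
      by_cases hc : c = 'O'
      · subst hc
        have hp : List.isPrefixOf ['O'] ('O' :: t) = true := by simp [List.isPrefixOf]
        simp only [PySem.Chars.replace.go, hp, if_true]
        rw [ih _ _ (by simpa using Nat.le_of_succ_le_succ h)]
        simp
      · have hp : List.isPrefixOf ['O'] (c :: t) = false := by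
          simp [List.isPrefixOf]; intro hco; exact absurd hco.symm hc
        simp only [PySem.Chars.replace.go, hp, Bool.false_eq_true, if_false]
        rw [ih _ _ (by simpa using Nat.le_of_succ_le_succ h)]
        simp [hc]

theorem filter_length_count (row : List Char) :
    (row.filter (· ≠ 'O')).length + row.count 'O' = row.length := by
  induction row with
  | nil => simp
  | cons c r ih =>
    by_cases hc : c = 'O' <;>
      simp [hc] at ih ⊢ <;> omega

theorem countA_eq (row : List Char) :
    PySem.Chars.len row - PySem.Chars.len (PySem.Chars.replace row ['O'] []) = (row.count 'O' : Int) := by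
  have h1 : PySem.Chars.replace row ['O'] [] = row.filter (· ≠ 'O') := by
    have : List.isEmpty ['O'] = false := rfl
    simp only [PySem.Chars.replace, this, Bool.false_eq_true, if_false]
    simpa using replace_go_filter row.length row [] (le_refl _)
  rw [h1]
  have := filter_length_count row
  simp only [PySem.Chars.len_eq]
  omega

theorem foldl_const_iterate {α β : Type} (l : List β) (g : α → α) (x : α) :
    l.foldl (fun r _ => g r) x = g^[l.length] x := by
  induction l generalizing x with
  | nil => rfl
  | cons y ys ih => simp [List.foldl, ih, Function.iterate_succ_apply]

theorem tiltInner_bridge (rest : List Char) : ∀ pre : List Char,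
    (tiltInner (pre ++ rest) (PySem.List.pyRange (pre.length : Int) ((pre ++ rest).length : Int) 1) (-1)
      = match findSwap rest with
        | none => pre ++ rest
        | some r' => pre ++ r') ∧
    (∀ d : Nat, d < pre.length →
      tiltInner (pre ++ rest) (PySem.List.pyRange (pre.length : Int) ((pre ++ rest).length : Int) 1) (d : Int)
        = match grabO rest with
          | some r' => pre.set d 'O' ++ r'
          | none =>
            match findSwap rest with
            | none => pre ++ rest
            | some r' => pre ++ r') := by
  induction rest with
  | nil =>
    intro pre
    constructor
    · simp only [List.append_nil]
      rw [PySem.List.pyRange_one_eq_nil (le_refl _)]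
      simp [tiltInner, findSwap]
    · intro d hd
      simp only [List.append_nil]
      rw [PySem.List.pyRange_one_eq_nil (le_refl _)]
      simp [tiltInner, grabO, findSwap]
  | cons c rest' ih =>
    intro pre
    have hlt : ((pre.length : Nat) : Int) < (((pre ++ c :: rest').length : Nat) : Int) := by
      simp
    have hget : PySem.List.pyGet? (pre ++ c :: rest') ((pre.length : Nat) : Int) = some c := by
      rw [PySem.List.pyGet?_natCast]
      simp
    -- the recursive calls continue with pre extended by one character
    have hrow : ∀ x : Char, (pre ++ [x]) ++ rest' = pre ++ x :: rest' := by
      intro x; simp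
    have hlen1 : ∀ x : Char, (((pre ++ [x]).length : Nat) : Int) = ((pre.length : Nat) : Int) + 1 := by
      intro x; simp
    constructor
    · -- lowestIndex = -1 (no dot recorded yet)
      rw [PySem.List.pyRange_one_cons hlt]
      simp only [tiltInner, hget]
      by_cases hd : c = '.'
      · -- record the dot at index pre.length and continue
        subst hd
        rw [if_neg (by simp), if_pos (by simp)]
        have h2 := (ih (pre ++ ['.'])).2 pre.length (by simp)
        rw [hrow, hlen1] at h2
        cases hg : grabO rest' with
        | some r0 =>
          rw [hg] at h2
          rw [h2, findSwap_dot_some hg]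
          have hset : (pre ++ ['.']).set pre.length 'O' = pre ++ ['O'] := by
            simp [List.set_append]
          rw [hset]
          simp
        | none =>
          rw [hg] at h2
          rw [h2, findSwap_dot_none hg]
          cases hfs : findSwap rest' <;> simp [hfs]
      · -- c is not '.', state stays -1 (the 'O'/'#'/other branches all keep -1)
        rw [if_neg (by simp)]
        have h2 := (ih (pre ++ [c])).1
        rw [hrow, hlen1] at h2
        rw [if_neg (by simp [hd]), findSwap_other hd]
        by_cases hH : c = '#'
        · rw [if_pos hH, h2]
          cases hfs : findSwap rest' <;> simp [hfs]
        · rw [if_neg hH, h2]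
          cases hfs : findSwap rest' <;> simp [hfs]
    · -- lowestIndex = d (a dot is recorded at d < pre.length)
      intro d hdlt
      rw [PySem.List.pyRange_one_cons hlt]
      simp only [tiltInner, hget]
      by_cases hO : c = 'O'
      · -- the move fires: two slice assignments, then break
        subst hO
        rw [if_pos (⟨rfl, by omega⟩ : ('O':Char) = 'O' ∧ ((d:Nat):Int) ≠ -1)]
        have s1 : PySem.List.slice (pre ++ 'O' :: rest') none (some ((pre.length : Nat) : Int)) = pre := by
          rw [PySem.List.slice_to _ (by omega)]
          simp
        have s2 : PySem.List.slice (pre ++ 'O' :: rest') (some (((pre.length : Nat) : Int) + 1)) none = rest' := by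
          rw [PySem.List.slice_from _ (by omega)]
          have ht : (((pre.length : Nat) : Int) + 1).toNat = pre.length + 1 := by omega
          rw [ht, ← hrow 'O', List.drop_left' (by simp)]
        rw [s1, s2]
        have s3 : PySem.List.slice ((pre ++ ['.']) ++ rest') none (some ((d : Nat) : Int)) = pre.take d := by
          rw [PySem.List.slice_to _ (by omega)]
          have ht : ((d : Nat) : Int).toNat = d := by omega
          rw [ht, List.take_append_of_le_length (by simp; omega),
            List.take_append_of_le_length (by omega)]
        have s4 : PySem.List.slice ((pre ++ ['.']) ++ rest') (some (((d : Nat) : Int) + 1)) none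
            = (pre.drop (d + 1) ++ ['.']) ++ rest' := by
          rw [PySem.List.slice_from _ (by omega)]
          have ht : (((d : Nat) : Int) + 1).toNat = d + 1 := by omega
          rw [ht, List.drop_append_of_le_length (by simp; omega),
            List.drop_append_of_le_length (by omega)]
        rw [s3, s4]
        have hgo : grabO ('O' :: rest') = some ('.' :: rest') := by simp [grabO]
        rw [hgo]
        rw [List.set_eq_take_append_cons_drop, if_pos hdlt]
        simp
      · rw [if_neg (by intro hco; exact hO hco.1)]
        rw [if_neg (by intro hco; omega)]
        by_cases hH : c = '#'
        · -- '#': reset to -1, continue in no-dot state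
          subst hH
          rw [if_pos rfl]
          have h2 := (ih (pre ++ ['#'])).1
          rw [hrow, hlen1] at h2
          rw [h2]
          have hgg : grabO ('#' :: rest') = none := by simp [grabO]
          rw [hgg, findSwap_other (by decide)]
          cases hfs : findSwap rest' <;> simp [hfs]
        · -- '.' (dot stays at d) or any other character: state unchanged
          rw [if_neg hH]
          have h2 := (ih (pre ++ [c])).2 d (by simp; omega)
          rw [hrow, hlen1] at h2
          rw [h2]
          have hgr : grabO (c :: rest') = Option.map (c :: ·) (grabO rest') := by
            simp [grabO, hO, hH]
          rw [hgr]
          cases hg : grabO rest' with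
          | some r0 =>
            have hset : (pre ++ [c]).set d 'O' = pre.set d 'O' ++ [c] := by
              rw [List.set_append, if_pos hdlt]
            simp [hset]
          | none =>
            have hfsc : findSwap (c :: rest') = Option.map (c :: ·) (findSwap rest') := by
              by_cases hdot : c = '.'
              · subst hdot; exact findSwap_dot_none hg
              · exact findSwap_other hdot rest'
            rw [hfsc]
            cases hfs : findSwap rest' <;> simp [hfs]

theorem tiltInner_eq_stepT (r : List Char) :
    tiltInner r (PySem.List.pyRange 0 (PySem.Chars.len r) 1) (-1) = stepT r := by
  have hb := (tiltInner_bridge r []).1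
  simp only [List.nil_append, List.length_nil, Nat.cast_zero] at hb
  rw [PySem.Chars.len_eq, hb]
  cases h : findSwap r <;> simp [stepT, h]

theorem tiltRowA_eq_iterate (row : List Char) :
    tiltRowA row = stepT^[row.count 'O'] row := by
  unfold tiltRowA
  rw [countA_eq]
  rw [foldl_const_iterate _ (fun r => tiltInner r (PySem.List.pyRange 0 (PySem.Chars.len r) 1) (-1)) row]
  have hlen : (PySem.List.pyRange 0 ((row.count 'O' : Nat) : Int) 1).length = row.count 'O' := by
    rw [PySem.List.length_pyRange_one]
    simp
  rw [hlen]
  have hg : (fun r : List Char => tiltInner r (PySem.List.pyRange 0 (PySem.Chars.len r) 1) (-1)) = stepT := by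
    funext r
    exact tiltInner_eq_stepT r
  rw [hg]

-- ---- B-side bridge ----

def headSeg : List Char → List Char
  | [] => []
  | c :: r => if c = '#' then [] else c :: headSeg r

def tailSegs : List Char → List (List Char)
  | [] => []
  | c :: r => if c = '#' then splitHash r else tailSegs r

theorem repl_eq_fillSeg (seg : List Char) : ∀ n : Nat,
    replDotToO n (replOtoDot seg) = fillSeg n seg := by
  induction seg with
  | nil => intro n; rfl
  | cons c r ih =>
    intro n
    by_cases hO : c = 'O'
    · subst hO
      show replDotToO n ('.' :: replOtoDot r) = _
      by_cases hn : 0 < n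
      · rw [replDotToO, if_pos ⟨rfl, hn⟩, ih]
        rw [fillSeg, if_pos (Or.inl rfl), if_pos hn]
      · rw [replDotToO, if_neg (fun hc => hn hc.2), ih]
        rw [fillSeg, if_pos (Or.inl rfl), if_neg hn]
    · by_cases hd : c = '.'
      · subst hd
        show replDotToO n ('.' :: replOtoDot r) = _
        by_cases hn : 0 < n
        · rw [replDotToO, if_pos ⟨rfl, hn⟩, ih]
          rw [fillSeg, if_pos (Or.inr rfl), if_pos hn]
        · rw [replDotToO, if_neg (fun hc => hn hc.2), ih]
          rw [fillSeg, if_pos (Or.inr rfl), if_neg hn]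
      · show replDotToO n ((if c = 'O' then '.' else c) :: replOtoDot r) = _
        rw [if_neg hO, replDotToO, if_neg (fun hc => hd hc.1), ih]
        rw [fillSeg, if_neg (by simp [hO, hd])]

theorem splitHash_eq (row : List Char) : splitHash row = headSeg row :: tailSegs row := by
  induction row with
  | nil => rfl
  | cons c r ih =>
    by_cases hc : c = '#'
    · simp [splitHash, headSeg, tailSegs, hc]
    · simp [splitHash, headSeg, tailSegs, hc, ih]

theorem headSeg_count (row : List Char) : (headSeg row).count 'O' = segO row := by
  induction row with
  | nil => rfl
  | cons c r ih =>
    by_cases hc : c = '#'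
    · simp [headSeg, segO, hc]
    · by_cases hO : c = 'O' <;> simp [headSeg, segO, hc, hO, ih] <;> omega

theorem joinHash_cons (a : Char) (X : List Char) (ys : List (List Char)) :
    joinHash ((a :: X) :: ys) = a :: joinHash (X :: ys) := by
  cases ys <;> simp [joinHash]

theorem bridgeB (row : List Char) : ∀ n : Nat,
    joinHash (fillSeg n (headSeg row) :: (tailSegs row).map (fun seg => fillSeg (seg.count 'O') seg))
      = fillGo n row := by
  induction row with
  | nil => intro n; simp [headSeg, tailSegs, fillSeg, fillGo, joinHash]
  | cons c r ih =>
    intro n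
    by_cases hc : c = '#'
    · subst hc
      have h1 : headSeg ('#' :: r) = [] := by simp [headSeg]
      have h2 : tailSegs ('#' :: r) = headSeg r :: tailSegs r := by simp [tailSegs, splitHash_eq]
      rw [h1, h2, List.map_cons, headSeg_count]
      show joinHash (fillSeg n [] :: _ :: _) = _
      simp only [fillSeg, joinHash, List.nil_append]
      rw [ih (segO r)]
      simp [fillGo]
    · by_cases hs : c = 'O' ∨ c = '.'
      · simp only [headSeg, tailSegs, if_neg hc, fillSeg, if_pos hs]
        by_cases hn : 0 < n
        · simp only [if_pos hn, joinHash_cons, ih (n - 1), fillGo, if_neg hc, if_pos hs]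
        · simp only [if_neg hn, joinHash_cons, ih n, fillGo, if_neg hc, if_pos hs]
      · simp only [headSeg, tailSegs, if_neg hc, fillSeg, if_neg hs, joinHash_cons, ih n,
          fillGo]

theorem tiltRowB_eq_fill (row : List Char) : tiltRowB row = fillGo (segO row) row := by
  unfold tiltRowB
  rw [List.map_congr_left (fun seg _ => repl_eq_fillSeg seg (seg.count 'O'))]
  rw [splitHash_eq, List.map_cons, headSeg_count]
  exact bridgeB row (segO row)

-- ---- core: the iterated swap loop reaches the packed form ----

theorem grabO_some {xs : List Char} : ∀ {r' : List Char}, grabO xs = some r' →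
    ∃ M V, xs = M ++ 'O' :: V ∧ r' = M ++ '.' :: V ∧ '#' ∉ M ∧ 'O' ∉ M := by
  induction xs with
  | nil => intro r' h; simp [grabO] at h
  | cons c rest ih =>
    intro r' h
    by_cases hO : c = 'O'
    · refine ⟨[], rest, by simp [hO], ?_, by simp, by simp⟩
      simp [grabO, hO] at h; simp [h.symm]
    · by_cases hH : c = '#'
      · simp [grabO, hO, hH] at h
      · simp only [grabO, if_neg hO, if_neg hH] at h
        obtain ⟨r0, hr0, hmap⟩ := Option.map_eq_some_iff.mp h
        obtain ⟨M, V, h1, h2, h3, h4⟩ := ih hr0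
        exact ⟨c :: M, V, by simp [h1], by simp [h2, hmap.symm],
          by simp [h3]; exact fun he => hH he.symm, by simp [h4]; exact fun he => hO he.symm⟩

theorem grabO_none_mem {P : List Char} : ∀ {Q : List Char}, grabO (P ++ 'O' :: Q) = none → '#' ∈ P := by
  induction P with
  | nil => intro Q h; simp [grabO] at h
  | cons p P' ih =>
    intro Q h
    by_cases hO : p = 'O'
    · simp [grabO, hO] at h
    · by_cases hH : p = '#'
      · simp [hH]
      · simp only [grabO, List.cons_append, if_neg hO, if_neg hH, Option.map_eq_none_iff] at h
        exact List.mem_cons_of_mem _ (ih h)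

theorem dotSt_indep {U : List Char} : '#' ∈ U → ∀ b b' : Bool, dotSt b U = dotSt b' U := by
  induction U with
  | nil => intro h; simp at h
  | cons c r ih =>
    intro h b b'
    by_cases hH : c = '#'
    · simp [dotSt, hH]
    · have hm : '#' ∈ r := by
        cases List.mem_cons.mp h with
        | inl h1 => exact absurd h1.symm hH
        | inr h1 => exact h1
      simp only [dotSt]
      exact ih hm _ _

theorem findSwap_some_decomp {row : List Char} : ∀ {r' : List Char}, findSwap row = some r' →
    ∃ U M V, row = U ++ ('.' :: (M ++ 'O' :: V)) ∧ r' = U ++ ('O' :: (M ++ '.' :: V)) ∧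
      dotSt false U = false ∧ '#' ∉ M ∧ 'O' ∉ M := by
  induction row with
  | nil => intro r' h; simp [findSwap] at h
  | cons c rest ih =>
    intro r' h
    by_cases hd : c = '.'
    · subst hd
      cases hg : grabO rest with
      | some r0 =>
        rw [findSwap_dot_some hg, Option.some.injEq] at h
        obtain ⟨M, V, h1, h2, h3, h4⟩ := grabO_some hg
        exact ⟨[], M, V, by simp [h1], by simp [← h, h2], rfl, h3, h4⟩
      | none =>
        rw [findSwap_dot_none hg, Option.map_eq_some_iff] at h
        obtain ⟨r0, hr0, hmap⟩ := h
        obtain ⟨U', M, V, h1, h2, h3, h4, h5⟩ := ih hr0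
        have hhash : '#' ∈ U' := by
          have hgg : grabO ((U' ++ '.' :: M) ++ 'O' :: V) = none := by
            have hassoc : (U' ++ '.' :: M) ++ 'O' :: V = U' ++ '.' :: (M ++ 'O' :: V) := by
              simp
            rw [hassoc, ← h1]; exact hg
          have hmem := grabO_none_mem hgg
          rcases List.mem_append.mp hmem with h6 | h6
          · exact h6
          · exfalso
            rcases List.mem_cons.mp h6 with h7 | h7
            · exact absurd h7 (by decide)
            · exact h4 h7
        refine ⟨'.' :: U', M, V, by simp [h1], by simp [← hmap, h2], ?_, h4, h5⟩
        show dotSt (if ('.':Char) = '#' then false else if ('.':Char) = '.' then true else false) U' = false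
        rw [if_neg (by decide), if_pos rfl]
        rw [dotSt_indep hhash true false]
        exact h3
    · rw [findSwap_other hd, Option.map_eq_some_iff] at h
      obtain ⟨r0, hr0, hmap⟩ := h
      obtain ⟨U', M, V, h1, h2, h3, h4, h5⟩ := ih hr0
      refine ⟨c :: U', M, V, by simp [h1], by simp [← hmap, h2], ?_, h4, h5⟩
      by_cases hH : c = '#'
      · subst hH
        rw [dotSt_hash]
        exact h3
      · rw [dotSt_other hH hd]
        exact h3

theorem unsC_append (X : List Char) : ∀ (Y : List Char) (b : Bool),
    unsC b (X ++ Y) = unsC b X + unsC (dotSt b X) Y := by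
  induction X with
  | nil => intro Y b; simp [unsC, dotSt]
  | cons c r ih =>
    intro Y b
    rw [List.cons_append]
    by_cases hH : c = '#'
    · subst hH; rw [unsC_hash, unsC_hash, dotSt_hash, ih]
    · by_cases hd : c = '.'
      · subst hd; rw [unsC_dot, unsC_dot, dotSt_dot, ih]
      · by_cases hO : c = 'O'
        · subst hO
          rw [unsC_O, unsC_O, dotSt_other (by decide) (by decide), ih]
          omega
        · rw [unsC_other hH hd hO, unsC_other hH hd hO, dotSt_other hH hd, ih]

theorem unsC_noO {M : List Char} : 'O' ∉ M → ∀ b : Bool, unsC b M = 0 := by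
  induction M with
  | nil => intro _ b; rfl
  | cons c r ih =>
    intro h b
    have hc : c ≠ 'O' := fun he => h (by simp [he])
    have hr : 'O' ∉ r := fun he => h (by simp [he])
    by_cases hH : c = '#'
    · subst hH; rw [unsC_hash]; exact ih hr false
    · by_cases hd : c = '.'
      · subst hd; rw [unsC_dot]; exact ih hr true
      · rw [unsC_other hH hd hc]; exact ih hr b

theorem dotSt_noHash_true {M : List Char} : '#' ∉ M → dotSt true M = true := by
  induction M with
  | nil => intro _; rfl
  | cons c r ih =>
    intro h
    have hc : c ≠ '#' := fun he => h (by simp [he])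
    have hr : '#' ∉ r := fun he => h (by simp [he])
    by_cases hd : c = '.'
    · subst hd; rw [dotSt_dot]; exact ih hr
    · rw [dotSt_other hc hd]; exact ih hr

theorem unsC_le_count (row : List Char) : ∀ b : Bool, unsC b row ≤ row.count 'O' := by
  induction row with
  | nil => intro b; simp [unsC]
  | cons c r ih =>
    intro b
    have h1 := ih b
    have h2 := ih true
    have h3 := ih false
    by_cases hH : c = '#'
    · subst hH; rw [unsC_hash, List.count_cons]; simp; omega
    · by_cases hd : c = '.'
      · subst hd; rw [unsC_dot, List.count_cons]; simp; omega
      · by_cases hO : c = 'O'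
        · subst hO; rw [unsC_O, List.count_cons]; cases b <;> simp <;> omega
        · rw [unsC_other hH hd hO, List.count_cons]; simp [hO]; omega

theorem unsC_swap {U M V : List Char} (hU : dotSt false U = false) (hM : '#' ∉ M) (hO : 'O' ∉ M) :
    unsC false (U ++ ('O' :: (M ++ '.' :: V))) + 1 = unsC false (U ++ ('.' :: (M ++ 'O' :: V))) := by
  have L : unsC false (U ++ ('O' :: (M ++ '.' :: V)))
      = unsC false U + (unsC false M + unsC true V) := by
    rw [unsC_append U _ false, hU, unsC_O, unsC_append M _ false, unsC_dot]
    simp [unsC_noO hO]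
  have R : unsC false (U ++ ('.' :: (M ++ 'O' :: V)))
      = unsC false U + (unsC true M + (1 + unsC true V)) := by
    rw [unsC_append U _ false, hU, unsC_dot, unsC_append M _ true, dotSt_noHash_true hM, unsC_O]
    simp
  rw [L, R, unsC_noO hO, unsC_noO hO]
  omega

theorem segO_append_noHash {M : List Char} : '#' ∉ M → ∀ X : List Char,
    segO (M ++ X) = M.count 'O' + segO X := by
  induction M with
  | nil => intro _ X; simp [segO]
  | cons c r ih =>
    intro h X
    have hc : c ≠ '#' := fun he => h (by simp [he])
    have hr : '#' ∉ r := fun he => h (by simp [he])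
    by_cases hO : c = 'O' <;> simp [segO, hc, hO, List.count_cons, ih hr] <;> omega

theorem segO_swap {M : List Char} (h : '#' ∉ M) (V : List Char) : ∀ U : List Char,
    segO (U ++ ('.' :: (M ++ 'O' :: V))) = segO (U ++ ('O' :: (M ++ '.' :: V))) := by
  intro U
  induction U with
  | nil =>
    simp only [List.nil_append]
    rw [segO_cons (by decide : ('.':Char) ≠ '#') (M ++ 'O' :: V),
      segO_cons (by decide : ('O':Char) ≠ '#') (M ++ '.' :: V),
      segO_append_noHash h ('O' :: V), segO_append_noHash h ('.' :: V),
      segO_cons (by decide : ('O':Char) ≠ '#') V, segO_cons (by decide : ('.':Char) ≠ '#') V]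
    simp
    omega
  | cons c U' ih =>
    rw [List.cons_append, List.cons_append]
    by_cases hH : c = '#'
    · subst hH; rw [segO_hash, segO_hash]
    · rw [segO_cons hH, segO_cons hH, ih]

theorem fillGo_slot_swap {M : List Char} : '#' ∉ M → ∀ (V : List Char) (m : Nat),
    fillGo m (M ++ 'O' :: V) = fillGo m (M ++ '.' :: V) := by
  induction M with
  | nil =>
    intro _ V m
    show fillGo m ('O' :: V) = fillGo m ('.' :: V)
    rw [fillGo_slot (Or.inl rfl), fillGo_slot (Or.inr rfl)]
  | cons c r ih =>
    intro h V m
    have hc : c ≠ '#' := fun he => h (by simp [he])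
    have hr : '#' ∉ r := fun he => h (by simp [he])
    show fillGo m (c :: (r ++ 'O' :: V)) = fillGo m (c :: (r ++ '.' :: V))
    by_cases hs : c = 'O' ∨ c = '.'
    · rw [fillGo_slot hs, fillGo_slot hs, ih hr, ih hr]
    · rw [fillGo_other hc hs, fillGo_other hc hs, ih hr]

theorem fillGo_swap {M : List Char} (h : '#' ∉ M) (V : List Char) : ∀ (U : List Char) (n : Nat),
    fillGo n (U ++ ('.' :: (M ++ 'O' :: V))) = fillGo n (U ++ ('O' :: (M ++ '.' :: V))) := by
  intro U
  induction U with
  | nil =>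
    intro n
    simp only [List.nil_append]
    show fillGo n ('.' :: (M ++ 'O' :: V)) = fillGo n ('O' :: (M ++ '.' :: V))
    rw [fillGo_slot (Or.inr rfl), fillGo_slot (Or.inl rfl)]
    simp only [fillGo_slot_swap h]
  | cons c U' ih =>
    intro n
    rw [List.cons_append, List.cons_append]
    by_cases hH : c = '#'
    · subst hH
      rw [fillGo_hash, fillGo_hash, segO_swap h V U', ih]
    · by_cases hs : c = 'O' ∨ c = '.'
      · rw [fillGo_slot hs, fillGo_slot hs, ih, ih]
      · rw [fillGo_other hH hs, fillGo_other hH hs, ih]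

theorem findSwap_none_unsC (row : List Char) : ∀ b : Bool,
    (b = true → grabO row = none) → findSwap row = none → unsC b row = 0 := by
  induction row with
  | nil => intro b _ _; rfl
  | cons c rest ih =>
    intro b h1 h2
    by_cases hd : c = '.'
    · subst hd
      cases hg : grabO rest with
      | some r0 => rw [findSwap_dot_some hg] at h2; exact absurd h2 (by simp)
      | none =>
        rw [findSwap_dot_none hg, Option.map_eq_none_iff] at h2
        rw [unsC_dot]
        exact ih true (fun _ => hg) h2
    · rw [findSwap_other hd, Option.map_eq_none_iff] at h2
      by_cases hH : c = '#'
      · subst hH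
        rw [unsC_hash]
        exact ih false (by simp) h2
      · by_cases hO : c = 'O'
        · subst hO
          cases b with
          | true => exact absurd (h1 rfl) (by simp [grabO])
          | false =>
            rw [unsC_O]
            simpa using ih false (by simp) h2
        · have hg' : b = true → grabO rest = none := by
            intro hb
            have hgr := h1 hb
            rw [grabO, if_neg hO, if_neg hH, Option.map_eq_none_iff] at hgr
            exact hgr
          rw [unsC_other hH hd hO]
          exact ih b hg' h2

theorem segO_of_unsC_true {row : List Char} : unsC true row = 0 → segO row = 0 := by
  induction row with
  | nil => intro _; rfl
  | cons c r ih =>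
    intro h
    by_cases hH : c = '#'
    · subst hH; rw [segO_hash]
    · by_cases hd : c = '.'
      · subst hd
        rw [unsC_dot] at h
        rw [segO_cons (by decide), ih h]
        decide
      · by_cases hO : c = 'O'
        · subst hO; rw [unsC_O] at h; simp at h
        · rw [unsC_other hH hd hO] at h
          rw [segO_cons hH, ih h]
          simp [hO]

theorem fill_fixpoint (row : List Char) : ∀ b : Bool, unsC b row = 0 → fillGo (segO row) row = row := by
  induction row with
  | nil => intro b _; rfl
  | cons c r ih =>
    intro b h
    by_cases hH : c = '#'
    · subst hH
      rw [unsC_hash] at h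
      rw [segO_hash, fillGo_hash, ih false h]
    · by_cases hO : c = 'O'
      · subst hO
        have hb : b = false := by
          cases b with
          | false => rfl
          | true => rw [unsC_O] at h; simp at h
        subst hb
        rw [unsC_O] at h
        have h' : unsC false r = 0 := by simpa using h
        rw [segO_cons (by decide), if_pos rfl,
          fillGo_slot (Or.inl rfl), if_pos (by omega : 0 < 1 + segO r)]
        rw [show 1 + segO r - 1 = segO r from by omega, ih false h']
      · by_cases hd : c = '.'
        · subst hd
          rw [unsC_dot] at h
          have hseg : segO r = 0 := segO_of_unsC_true h
          rw [segO_cons (by decide), if_neg (by decide), fillGo_slot (Or.inr rfl), hseg]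
          rw [if_neg (by omega : ¬ (0:Nat) < 0 + 0)]
          have := ih true h
          rw [hseg] at this
          rw [show (0:Nat) + 0 = 0 from rfl, this]
        · rw [unsC_other hH hd hO] at h
          rw [segO_cons hH, if_neg hO, Nat.zero_add, fillGo_other hH (by simp [hO, hd]), ih b h]

theorem iterate_fill (n : Nat) : ∀ row : List Char,
    unsC false row ≤ n → stepT^[n] row = fillGo (segO row) row := by
  induction n with
  | zero =>
    intro row h
    have h0 : unsC false row = 0 := Nat.le_zero.mp h
    have hfs : findSwap row = none := by
      cases hf : findSwap row with
      | none => rfl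
      | some r' =>
        exfalso
        obtain ⟨U, M, V, h1, _, h3, h4, h5⟩ := findSwap_some_decomp hf
        have := unsC_swap (U := U) (M := M) (V := V) h3 h4 h5
        rw [← h1] at this
        omega
    simp only [Function.iterate_zero, id_eq]
    exact (fill_fixpoint row false h0).symm
  | succ n ih =>
    intro row h
    rw [Function.iterate_succ_apply]
    cases hf : findSwap row with
    | none =>
      have hstep : stepT row = row := by simp [stepT, hf]
      rw [hstep]
      have h0 : unsC false row = 0 := findSwap_none_unsC row false (by simp) hf
      exact ih row (by omega)
    | some r' =>
      have hstep : stepT row = r' := by simp [stepT, hf]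
      rw [hstep]
      obtain ⟨U, M, V, h1, h2, h3, h4, h5⟩ := findSwap_some_decomp hf
      have hdec := unsC_swap (U := U) (M := M) (V := V) h3 h4 h5
      rw [← h1, ← h2] at hdec
      have hih := ih r' (by omega)
      rw [hih, h1, h2]
      rw [segO_swap h4 V U, fillGo_swap h4 V U]

theorem tiltRow_eq (row : List Char) : tiltRowA row = tiltRowB row := by
  rw [tiltRowA_eq_iterate, tiltRowB_eq_fill]
  exact iterate_fill _ row (unsC_le_count row false)

-- ===== VERDICT (by name: the statement is the Claim_ definition above) =====
theorem tiltBoard_spec : Claim_equal_tiltBoard := by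
  intro platformList _
  show tiltBoard platformList = tiltBoard_alt platformList
  unfold tiltBoard tiltBoard_alt
  rw [PySem.List.foldl_append_singleton_eq_map]
  exact List.map_congr_left (fun row _ => by rw [tiltRow_eq])
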